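-- pv_equiv track=rewrite | github.com/jbalarcon/roundtable-spv-trad | scripts/final_json_fix.py | fix_json_string_value
-- ===== SOURCE A (Python) =====
-- def fix_json_string_value(value_str):
--     """
--     Fix a JSON string value by:
--     1. Escaping unescaped quotes
--     2. Removing invalid escapes like \. \$ \% etc.
--     """
--     result = []
--     i = 0
--     while i < len(value_str):
--         if value_str[i] == '\\':
--             # Check what follows the backslash
--             if i + 1 < len(value_str):
--                 next_char = value_str[i+1]
--                 # Valid JSON escapes: " \ / b f n r t u
--                 if next_char in '"\\/ bfnrtu':
--                     # Keep valid escape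
--                     result.append(value_str[i:i+2])
--                     i += 2
--                 else:
--                     # Invalid escape like \. or \% - remove the backslash
--                     result.append(next_char)
--                     i += 2
--             else:
--                 # Trailing backslash - remove it
--                 i += 1
--         elif value_str[i] == '"':
--             # Unescaped quote - escape it
--             result.append('\\"')
--             i += 1
--         else:
--             result.append(value_str[i])
--             i += 1
--     return ''.join(result)
-- ===== SOURCE B (Python) =====
-- def fix_json_string_value(value_str):
--     """Chunk-wise: jump to each backslash with str.find, bulk-escape quotes in the
--     backslash-free chunks with str.replace; only the escape pair is handled per char."""
--     pieces = []
--     s = value_str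
--     while True:
--         j = s.find('\\')
--         if j == -1:
--             pieces.append(s.replace('"', '\\"'))
--             break
--         pieces.append(s[:j].replace('"', '\\"'))
--         if j + 1 < len(s):
--             c = s[j + 1]
--             pieces.append('\\' + c if c in '"\\/ bfnrtu' else c)
--         s = s[j + 2:]
--     return ''.join(pieces)
-- ===== Notes on version B (the rewrite author's own statement) =====
-- stated objective: faster
-- what changed: Replaced the per-character index scan by a chunk-wise loop: str.find jumps straight to the next backslash, the backslash-free chunk has its quotes escaped in bulk with str.replace, and only the two-character escape pair is handled individually.
import Mathlib
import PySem

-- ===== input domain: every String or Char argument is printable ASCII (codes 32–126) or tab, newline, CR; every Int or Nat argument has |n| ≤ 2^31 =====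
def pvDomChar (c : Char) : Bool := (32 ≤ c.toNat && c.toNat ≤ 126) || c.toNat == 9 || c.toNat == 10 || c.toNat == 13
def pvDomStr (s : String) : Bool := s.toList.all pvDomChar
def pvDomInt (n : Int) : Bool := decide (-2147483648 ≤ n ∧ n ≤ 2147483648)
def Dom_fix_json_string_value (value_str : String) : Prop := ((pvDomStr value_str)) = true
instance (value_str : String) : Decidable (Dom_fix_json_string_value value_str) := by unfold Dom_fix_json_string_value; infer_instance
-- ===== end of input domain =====

-- B replaces A's per-character index scan by a chunk-wise loop (str.find jumps to the
-- next backslash, str.replace bulk-escapes quotes in the backslash-free chunk); same output.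

-- valid JSON escape characters per A's string constant '"\/ bfnrtu' (note the space)
def pvValidEsc (c : Char) : Bool := "\"\\/ bfnrtu".toList.contains c

-- ===== PORT A =====
-- A's while loop over index i with result list of string pieces
def pvLoopA (s : List Char) (i : Nat) (acc : List (List Char)) : List (List Char) :=
  if _h : i < s.length then
    if s.getD i ' ' = '\\' then
      if i + 1 < s.length then
        let next := s.getD (i+1) ' '
        if pvValidEsc next then
          pvLoopA s (i+2) (acc ++ [(s.drop i).take 2])
        else
          pvLoopA s (i+2) (acc ++ [[next]])
      else
        pvLoopA s (i+1) acc
    else if s.getD i ' ' = '"' then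
      pvLoopA s (i+1) (acc ++ [['\\', '"']])
    else
      pvLoopA s (i+1) (acc ++ [[s.getD i ' ']])
  else acc
termination_by s.length - i
decreasing_by all_goals omega

def fix_json_string_value (value_str : String) : String :=
  String.ofList (pvLoopA value_str.toList 0 []).flatten   -- ''.join(result)

-- ===== PORT B =====
-- B's while loop: s.find('\\') locates the next backslash, s[:j].replace('"','\\"')
-- bulk-escapes the backslash-free chunk, then the single escape pair, then the tail s[j+2:].
-- The loop is totalized with a fuel parameter (each iteration strictly shortens s; fuel
-- s.length + 1 always suffices, so the 0-fuel arm is never reached on the stated call).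
def pvLoopB (fuel : Nat) (s : List Char) : List (List Char) :=
  match fuel with
  | 0 => []
  | fuel + 1 =>
    let j := PySem.Chars.find s ['\\']
    if j = -1 then
      [PySem.Chars.replace s ['"'] ['\\', '"']]
    else
      [PySem.Chars.replace (PySem.List.slice s none (some j)) ['"'] ['\\', '"']]
      ++ (if j + 1 < s.length then
            let c := s.getD (j.toNat + 1) ' '
            [if pvValidEsc c then ['\\', c] else [c]]
          else [])
      ++ pvLoopB fuel (PySem.List.slice s (some (j + 2)) none)

def fix_json_string_value_alt (value_str : String) : String :=
  String.ofList (pvLoopB (value_str.toList.length + 1) value_str.toList).flatten  -- ''.join(pieces)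

-- ===== PRECONDITION & SPEC =====
def Spec_fix_json_string_value (value_str : String) (out : String) : Prop := out = fix_json_string_value_alt value_str
instance (value_str : String) (out : String) : Decidable (Spec_fix_json_string_value value_str out) := by unfold Spec_fix_json_string_value; infer_instance

-- ===== CLAIM (what is proved, stated in full; the proofs are below) =====
def Claim_equal_fix_json_string_value : Prop := ∀ (value_str : String), Dom_fix_json_string_value value_str → Spec_fix_json_string_value value_str (fix_json_string_value value_str)

-- ===== LEMMAS AND PROOFS =====

-- common reference function: the intended character-level transformation
def pvSpecFn : List Char → List Char
  | [] => []
  | c :: rest =>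
    if c = '\\' then
      match rest with
      | [] => []
      | d :: r => (if pvValidEsc d then ['\\', d] else [d]) ++ pvSpecFn r
    else
      (if c = '"' then ['\\', '"'] else [c]) ++ pvSpecFn rest

-- quote-escaping of a chunk, character by character
def pvQrep (u : List Char) : List Char :=
  u.flatMap (fun c => if c = '"' then ['\\', '"'] else [c])

theorem pvReplace_go_eq (new : List Char) :
    ∀ (fuel : Nat) (l acc : List Char), l.length ≤ fuel →
      PySem.Chars.replace.go ['"'] new fuel l acc
        = acc.reverse ++ l.flatMap (fun c => if c = '"' then new else [c]) := by
  intro fuel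
  induction fuel with
  | zero =>
    intro l acc h
    have : l = [] := List.eq_nil_of_length_eq_zero (by omega)
    subst this
    simp [PySem.Chars.replace.go]
  | succ n ih =>
    intro l acc h
    cases l with
    | nil => simp [PySem.Chars.replace.go]
    | cons c t =>
      rw [PySem.Chars.replace.go]
      by_cases hc : c = '"'
      · subst hc
        have hp : List.isPrefixOf ['"'] ('"' :: t) = true := by simp [List.isPrefixOf]
        simp only [hp, if_true, List.length_cons, List.length_nil, Nat.zero_add, List.drop_succ_cons, List.drop_zero]
        rw [ih t (new.reverse ++ acc) (by simp at h; omega)]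
        simp
      · have hp : List.isPrefixOf ['"'] (c :: t) = false := by
          simp [List.isPrefixOf]; exact fun h' => hc h'.symm
        simp only [hp, Bool.false_eq_true, if_false]
        rw [ih t (c :: acc) (by simp at h; omega)]
        simp [hc]

theorem pvReplace_eq (u : List Char) :
    PySem.Chars.replace u ['"'] ['\\', '"'] = pvQrep u := by
  unfold PySem.Chars.replace
  simp only [List.isEmpty_cons, Bool.false_eq_true, if_false]
  rw [pvReplace_go_eq ['\\', '"'] u.length u [] le_rfl]
  simp [pvQrep]

theorem pvSpecFn_append (u t : List Char) (h : '\\' ∉ u) :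
    pvSpecFn (u ++ t) = pvQrep u ++ pvSpecFn t := by
  induction u with
  | nil => simp [pvQrep]
  | cons c v ih =>
    have hc : c ≠ '\\' := fun hc => h (hc ▸ List.mem_cons_self ..)
    have hv : '\\' ∉ v := fun hv => h (List.mem_cons_of_mem _ hv)
    have e : pvSpecFn (c :: (v ++ t)) = (if c = '"' then ['\\', '"'] else [c]) ++ pvSpecFn (v ++ t) := by
      rw [pvSpecFn.eq_def]
      simp [hc]
    rw [List.cons_append, e, ih hv]
    simp [pvQrep]

theorem pvSpecFn_cons_bs (d : Char) (r : List Char) :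
    pvSpecFn ('\\' :: d :: r) = (if pvValidEsc d then ['\\', d] else [d]) ++ pvSpecFn r := by
  rw [pvSpecFn.eq_def]; simp

theorem pvSpecFn_bs_nil : pvSpecFn ['\\'] = [] := by
  rw [pvSpecFn.eq_def]; simp

theorem pvSpecFn_cons (c : Char) (r : List Char) (h : c ≠ '\\') :
    pvSpecFn (c :: r) = (if c = '"' then ['\\', '"'] else [c]) ++ pvSpecFn r := by
  rw [pvSpecFn.eq_def]; simp [h]

theorem pvFindFacts (s : List Char) (h : ¬ PySem.Chars.find s ['\\'] = -1) :
    let k := (PySem.Chars.find s ['\\']).toNat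
    0 ≤ PySem.Chars.find s ['\\'] ∧ k < s.length ∧ s.drop k = '\\' :: s.drop (k+1) ∧ '\\' ∉ s.take k := by
  intro k
  have h0 : 0 ≤ PySem.Chars.find s ['\\'] := by
    have := PySem.Chars.neg_one_le_find s ['\\']
    omega
  obtain ⟨hpre, hmin⟩ := PySem.Chars.find_spec h0
  have hk : k < s.length := by
    by_contra hk
    rw [List.drop_eq_nil_of_le (by omega)] at hpre
    simpa using hpre.length_le
  have hget : s[k] = '\\' := by
    have hd := List.drop_eq_getElem_cons hk
    rw [hd] at hpre
    obtain ⟨t, ht⟩ := hpre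
    exact ((List.cons_eq_cons.mp ht).1).symm
  refine ⟨h0, hk, ?_, ?_⟩
  · rw [List.drop_eq_getElem_cons hk, hget]
  · intro hmem
    obtain ⟨i, hi, hgi⟩ := List.getElem_of_mem hmem
    have hik : i < k := by
      have := List.length_take_le k s
      omega
    have hgi' : s[i]'(by omega) = '\\' := by
      rw [← hgi]
      exact (List.getElem_take).symm
    refine hmin i hik ?_
    rw [List.drop_eq_getElem_cons (by omega : i < s.length), hgi']
    exact ⟨s.drop (i+1), rfl⟩

theorem pvMem_of_find_ne (s : List Char) (h : '\\' ∈ s) : PySem.Chars.find s ['\\'] ≠ -1 := by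
  rw [PySem.Chars.find_ne_neg_one_iff]
  obtain ⟨u, v, rfl⟩ := List.append_of_mem h
  exact ⟨u, v, by simp⟩

theorem pvLoopB_eq : ∀ (fuel : Nat) (s : List Char), s.length < fuel →
    (pvLoopB fuel s).flatten = pvSpecFn s := by
  intro fuel
  induction fuel with
  | zero => intro s h; omega
  | succ n ih =>
    intro s h
    by_cases hj : PySem.Chars.find s ['\\'] = -1
    · have hnb : '\\' ∉ s := fun hm => pvMem_of_find_ne s hm hj
      rw [pvLoopB]
      simp only [hj, if_true, List.flatten]
      rw [pvReplace_eq]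
      have := pvSpecFn_append s [] hnb
      simp only [List.append_nil, pvSpecFn] at this
      simp [this]
    · obtain ⟨h0, hk, hdrop, hnot⟩ := pvFindFacts s hj
      rw [pvLoopB]
      simp only [hj, if_false]
      rw [PySem.List.slice_to s h0, PySem.List.slice_from s (by omega : (0:Int) ≤ PySem.Chars.find s ['\\'] + 2)]
      have hk2 : (PySem.Chars.find s ['\\'] + 2).toNat = (PySem.Chars.find s ['\\']).toNat + 2 := by omega
      rw [hk2]
      set k := (PySem.Chars.find s ['\\']).toNat with hkdef
      have hsplit : s = s.take k ++ '\\' :: s.drop (k+1) := by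
        conv_lhs => rw [← List.take_append_drop k s]
        rw [hdrop]
      cases hv : s.drop (k+1) with
      | nil =>
        have hlen : s.length ≤ k + 1 := by
          have := congrArg List.length hv
          simp at this
          omega
        have hguard : ¬ (PySem.Chars.find s ['\\'] + 1 < (s.length : Int)) := by omega
        have hd2 : s.drop (k+2) = [] := List.drop_eq_nil_of_le (by omega)
        rw [hd2]
        simp only [hguard, if_false, List.append_nil, List.flatten_append]
        rw [ih [] (by simp; omega)]
        conv_rhs => rw [hsplit, hv]
        rw [pvSpecFn_append _ _ hnot, pvSpecFn_bs_nil, pvReplace_eq]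
        simp [pvSpecFn]
      | cons d r =>
        have hlen : k + 1 < s.length := by
          have := congrArg List.length hv
          simp at this
          omega
        have hguard : PySem.Chars.find s ['\\'] + 1 < (s.length : Int) := by omega
        have hget : s.getD (k+1) ' ' = d := by
          have h01 := congrArg (fun l => l[0]?) hv
          simp only [List.getElem?_drop, List.getElem?_cons_zero] at h01
          simp [List.getD_eq_getElem?_getD, h01]
        have hd2 : s.drop (k+2) = r := by
          have : s.drop (k+2) = (s.drop (k+1)).drop 1 := by
            rw [List.drop_drop]
          rw [this, hv]
          simp
        have hrlen : r.length < n := by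
          have := congrArg List.length hv
          simp at this
          omega
        simp only [List.flatten_append, hguard, if_true, hget]
        rw [hd2, ih r hrlen, pvReplace_eq]
        conv_rhs => rw [hsplit, hv]
        rw [pvSpecFn_append _ _ hnot, pvSpecFn_cons_bs]
        by_cases hvd : pvValidEsc d = true <;> simp [hvd]

theorem pvLoopA_eq (n : Nat) : ∀ (s : List Char) (i : Nat), s.length - i ≤ n →
    ∀ (acc : List (List Char)),
      (pvLoopA s i acc).flatten = acc.flatten ++ pvSpecFn (s.drop i) := by
  induction n with
  | zero =>
    intro s i h acc
    have hle : s.length ≤ i := by omega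
    rw [pvLoopA]
    simp [Nat.not_lt.mpr hle, List.drop_eq_nil_of_le hle, pvSpecFn]
  | succ n ih =>
    intro s i h acc
    rw [pvLoopA]
    by_cases hi : i < s.length
    · have hdi : s.drop i = s[i] :: s.drop (i+1) := List.drop_eq_getElem_cons hi
      have hgd : s.getD i ' ' = s[i] := List.getD_eq_getElem s ' ' hi
      simp only [hi, dite_true, hgd]
      by_cases hb : s[i] = '\\'
      · simp only [hb, if_true]
        by_cases h1 : i + 1 < s.length
        · have hd1 : s.drop (i+1) = s[i+1] :: s.drop (i+2) := List.drop_eq_getElem_cons h1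
          have hg1 : s.getD (i+1) ' ' = s[i+1] := List.getD_eq_getElem s ' ' h1
          simp only [h1, if_true, hg1]
          have htake : (s.drop i).take 2 = ['\\', s[i+1]] := by
            rw [hdi, hd1, hb]; rfl
          rw [htake, hdi, hd1]
          by_cases hv : pvValidEsc s[i+1] = true
          · simp only [hv, if_true]
            rw [ih s (i+2) (by omega), hb, pvSpecFn_cons_bs]
            simp [hv]
          · rw [Bool.not_eq_true] at hv
            simp only [hv, Bool.false_eq_true, if_false]
            rw [ih s (i+2) (by omega), hb, pvSpecFn_cons_bs]
            simp [hv]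
        · have hnil : s.drop (i+1) = [] := List.drop_eq_nil_of_le (by omega)
          simp only [h1, if_false]
          rw [ih s (i+1) (by omega), hdi, hnil, hb, pvSpecFn_bs_nil]
          simp [pvSpecFn]
      · simp only [hb, if_false]
        by_cases hq : s[i] = '"'
        · simp only [hq, if_true]
          rw [ih s (i+1) (by omega), hdi, pvSpecFn_cons _ _ hb, hq]
          simp
        · simp only [hq, if_false]
          rw [ih s (i+1) (by omega), hdi, pvSpecFn_cons _ _ hb]
          simp [hq]
    · simp only [hi, dite_false]
      have hnil : s.drop i = [] := List.drop_eq_nil_of_le (by omega)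
      simp [hnil, pvSpecFn]

-- ===== VERDICT (by name: the statement is the Claim_ definition above) =====
theorem fix_json_string_value_spec : Claim_equal_fix_json_string_value := by
  intro value_str _
  unfold Spec_fix_json_string_value fix_json_string_value fix_json_string_value_alt
  rw [pvLoopA_eq (value_str.toList.length) value_str.toList 0 (by omega) [],
      pvLoopB_eq (value_str.toList.length + 1) value_str.toList (by omega)]
  simp
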